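-- pv_equiv track=rewrite | github.com/Esya-rae/AoC2024 | 22/A.py | compute_nth
-- ===== SOURCE A (Python) =====
-- MOD = 16777216
--
-- def compute_nth(secret, n):
--     for i in range(n):
--         secret = secret ^ (secret * 64)
--         secret = secret % MOD
--         secret = secret ^ (secret // 32)
--         secret = secret % MOD
--         secret = secret ^ (secret * 2048)
--         secret = secret % MOD
--     return secret
-- ===== SOURCE B (Python) =====
-- MOD = 16777216
--
-- def _step(x):
--     x = (x ^ (x * 64)) % MOD
--     x = (x ^ (x // 32)) % MOD
--     x = (x ^ (x * 2048)) % MOD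
--     return x
--
-- def _apply(cols, v):
--     out = 0
--     j = 0
--     while v > 0:
--         if v % 2 == 1:
--             out ^= cols[j]
--         v //= 2
--         j += 1
--     return out
--
-- def compute_nth(secret, n):
--     # The step is a linear map over GF(2) on 24 bits: raise its 24x24 matrix
--     # (stored as 24 column masks) to the n-th power by repeated squaring.
--     if n <= 0:
--         return secret
--     cols = [_step(2 ** j) for j in range(24)]
--     res = [2 ** j for j in range(24)]
--     e = n
--     while e > 0:
--         if e % 2 == 1:
--             res = [_apply(cols, v) for v in res]
--         cols = [_apply(cols, v) for v in cols]
--         e //= 2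
--     return _apply(res, secret % MOD)
-- ===== Notes on version B (the rewrite author's own statement) =====
-- stated objective: faster
-- what changed: A iterates the secret step n times; B exploits that the step is a GF(2)-linear map on 24 bits and raises its 24x24 bit-matrix (stored as 24 column masks) to the n-th power by repeated squaring, applying it once to the reduced seed.
import Mathlib
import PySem

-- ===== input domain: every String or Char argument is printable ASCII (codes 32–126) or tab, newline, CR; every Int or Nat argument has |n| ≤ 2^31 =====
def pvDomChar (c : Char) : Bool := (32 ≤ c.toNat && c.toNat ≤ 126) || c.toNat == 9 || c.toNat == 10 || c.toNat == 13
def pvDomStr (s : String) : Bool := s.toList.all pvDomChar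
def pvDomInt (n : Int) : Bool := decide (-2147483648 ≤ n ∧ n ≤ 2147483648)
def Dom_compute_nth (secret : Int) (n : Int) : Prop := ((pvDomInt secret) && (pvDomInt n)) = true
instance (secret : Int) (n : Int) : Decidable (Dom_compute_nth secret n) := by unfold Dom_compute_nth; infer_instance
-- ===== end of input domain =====

-- B replaces A's n-fold iteration of the (GF(2)-linear, 24-bit) secret step by
-- exponentiation-by-squaring of its 24x24 bit-matrix (columns stored as bit masks).

-- ===== PORT A =====
def pvMOD : Int := 16777216

def compute_nth (secret : Int) (n : Int) : Int :=
  (PySem.List.pyRange 0 n 1).foldl (fun secret _ =>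
    let secret := PySem.Int.bxor secret (secret * 64)
    let secret := PySem.Int.mod secret pvMOD
    let secret := PySem.Int.bxor secret (PySem.Int.floordiv secret 32)
    let secret := PySem.Int.mod secret pvMOD
    let secret := PySem.Int.bxor secret (secret * 2048)
    PySem.Int.mod secret pvMOD) secret

-- ===== PORT B =====
-- _step of Source B
def pvStep (x : Int) : Int :=
  let x := PySem.Int.mod (PySem.Int.bxor x (x * 64)) pvMOD
  let x := PySem.Int.mod (PySem.Int.bxor x (PySem.Int.floordiv x 32)) pvMOD
  PySem.Int.mod (PySem.Int.bxor x (x * 2048)) pvMOD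

-- the 'while v > 0' loop of _apply; cols[j] ported as pyGetD (j is always in range when
-- reached from compute_nth_alt, where every vector has 24 bits)
def pvApply (cols : List Int) (v : Int) (j : Nat) (out : Int) : Int :=
  if 0 < v then
    pvApply cols (PySem.Int.floordiv v 2) (j + 1)
      (if PySem.Int.mod v 2 = 1 then PySem.Int.bxor out (PySem.List.pyGetD cols (j : Int) 0) else out)
  else out
termination_by v.toNat
decreasing_by
  rw [PySem.Int.floordiv_eq_ediv_of_pos (by norm_num : (0:Int) < 2)]
  omega

-- the 'while e > 0' loop of compute_nth (Source B)
def pvPowLoop (cols res : List Int) (e : Int) : List Int :=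
  if 0 < e then
    pvPowLoop (cols.map (fun v => pvApply cols v 0 0))
      (if PySem.Int.mod e 2 = 1 then res.map (fun v => pvApply cols v 0 0) else res)
      (PySem.Int.floordiv e 2)
  else res
termination_by e.toNat
decreasing_by
  rw [PySem.Int.floordiv_eq_ediv_of_pos (by norm_num : (0:Int) < 2)]
  omega

def compute_nth_alt (secret : Int) (n : Int) : Int :=
  if n ≤ 0 then secret
  else
    let cols := (PySem.List.pyRange 0 24 1).map (fun j => pvStep (2 ^ j.toNat))
    let res := (PySem.List.pyRange 0 24 1).map (fun j => (2 : Int) ^ j.toNat)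
    let res := pvPowLoop cols res n
    pvApply res (PySem.Int.mod secret pvMOD) 0 0

-- ===== PRECONDITION & SPEC =====
def Spec_compute_nth (secret : Int) (n : Int) (out : Int) : Prop := out = compute_nth_alt secret n
instance (secret : Int) (n : Int) (out : Int) : Decidable (Spec_compute_nth secret n out) := by unfold Spec_compute_nth; infer_instance

-- ===== CLAIM (what is proved, stated in full; the proofs are below) =====
def Claim_equal_compute_nth : Prop := ∀ (secret : Int) (n : Int), Dom_compute_nth secret n → Spec_compute_nth secret n (compute_nth secret n)

-- ===== LEMMAS AND PROOFS =====

-- Nat-level model of the three sub-steps of the generator, on 24-bit values.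
def pvS1 (x : ℕ) : ℕ := (x ^^^ x <<< 6) % 2 ^ 24
def pvS2 (x : ℕ) : ℕ := (x ^^^ x >>> 5) % 2 ^ 24
def pvS3 (x : ℕ) : ℕ := (x ^^^ x <<< 11) % 2 ^ 24
def pvN (x : ℕ) : ℕ := pvS3 (pvS2 (pvS1 x))

theorem pvXorMod (x y : ℕ) : (x ^^^ y) % 2 ^ 24 = x % 2 ^ 24 ^^^ y % 2 ^ 24 := by
  apply Nat.eq_of_testBit_eq
  intro i
  rw [Nat.testBit_xor, Nat.testBit_mod_two_pow, Nat.testBit_mod_two_pow,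
    Nat.testBit_mod_two_pow, Nat.testBit_xor]
  by_cases h : i < 24 <;> simp [h]

theorem pvComplEq (n v : ℕ) (hv : v < 2 ^ n) : v ^^^ (2 ^ n - 1) = 2 ^ n - 1 - v := by
  have h := BitVec.toNat_not (x := BitVec.ofNat n v)
  rw [← BitVec.xor_allOnes, BitVec.toNat_xor, BitVec.toNat_allOnes,
    BitVec.toNat_ofNat, Nat.mod_eq_of_lt hv] at h
  exact h

theorem pvNegEmod (u : ℕ) : (-(u : Int) - 1) % 16777216 = ((u % 2 ^ 24) ^^^ (2 ^ 24 - 1) : ℕ) := by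
  rw [pvComplEq 24 (u % 2 ^ 24) (Nat.mod_lt _ (by norm_num))]
  have hle : u % 2 ^ 24 ≤ 2 ^ 24 - 1 := by
    have := Nat.mod_lt u (y := 2 ^ 24) (by norm_num)
    omega
  push_cast [Nat.cast_sub hle]
  omega

theorem pvNatEmod (u : ℕ) : ((u : Int)) % 16777216 = ((u % 2 ^ 24 : ℕ) : Int) := by
  push_cast
  rfl

theorem pvBxorEmod (a b : Int) :
    (PySem.Int.bxor a b) % 16777216 =
      (((a % 16777216).toNat ^^^ (b % 16777216).toNat) : ℕ) := by
  unfold PySem.Int.bxor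
  split_ifs with ha hb hb
  · obtain ⟨x, rfl⟩ : ∃ x : ℕ, a = (x : Int) := ⟨a.toNat, (Int.toNat_of_nonneg ha).symm⟩
    obtain ⟨y, rfl⟩ : ∃ y : ℕ, b = (y : Int) := ⟨b.toNat, (Int.toNat_of_nonneg hb).symm⟩
    simp only [Int.toNat_natCast, pvNatEmod]
    rw [pvXorMod]
  · obtain ⟨k, rfl⟩ : ∃ k : ℕ, b = -(k : Int) - 1 :=
      ⟨(-b - 1).toNat, by have := Int.toNat_of_nonneg (by omega : (0:Int) ≤ -b - 1); omega⟩
    obtain ⟨x, rfl⟩ : ∃ x : ℕ, a = (x : Int) := ⟨a.toNat, (Int.toNat_of_nonneg ha).symm⟩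
    have hk : (-(-(k:Int) - 1) - 1).toNat = k := by omega
    rw [hk, Int.toNat_natCast, pvNegEmod, pvNatEmod, pvNegEmod,
      Int.toNat_natCast, Int.toNat_natCast, pvXorMod, Nat.xor_assoc]
  · obtain ⟨m, rfl⟩ : ∃ m : ℕ, a = -(m : Int) - 1 :=
      ⟨(-a - 1).toNat, by have := Int.toNat_of_nonneg (by omega : (0:Int) ≤ -a - 1); omega⟩
    obtain ⟨y, rfl⟩ : ∃ y : ℕ, b = (y : Int) := ⟨b.toNat, (Int.toNat_of_nonneg hb).symm⟩
    have hm : (-(-(m:Int) - 1) - 1).toNat = m := by omega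
    rw [hm, Int.toNat_natCast, pvNegEmod, pvNatEmod, pvNegEmod,
      Int.toNat_natCast, Int.toNat_natCast, pvXorMod]
    congr 1
    simp [Nat.xor_comm, Nat.xor_left_comm]
  · obtain ⟨m, rfl⟩ : ∃ m : ℕ, a = -(m : Int) - 1 :=
      ⟨(-a - 1).toNat, by have := Int.toNat_of_nonneg (by omega : (0:Int) ≤ -a - 1); omega⟩
    obtain ⟨k, rfl⟩ : ∃ k : ℕ, b = -(k : Int) - 1 :=
      ⟨(-b - 1).toNat, by have := Int.toNat_of_nonneg (by omega : (0:Int) ≤ -b - 1); omega⟩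
    have hm : (-(-(m:Int) - 1) - 1).toNat = m := by omega
    have hk : (-(-(k:Int) - 1) - 1).toNat = k := by omega
    rw [hm, hk, pvNatEmod, pvNegEmod, pvNegEmod, Int.toNat_natCast, Int.toNat_natCast,
      pvXorMod]
    congr 1
    simp [Nat.xor_comm, Nat.xor_left_comm]

theorem pvRedLt (s : Int) : (s % 16777216).toNat < 2 ^ 24 := by
  have := Int.emod_nonneg s (by norm_num : (16777216:Int) ≠ 0)
  have := Int.emod_lt_of_pos s (by norm_num : (0:Int) < 16777216)
  omega

-- the three sub-steps of A's loop body, named (each defeq to the port's let-chain pieces)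
def pvBody1 (s : Int) : Int := PySem.Int.mod (PySem.Int.bxor s (s * 64)) pvMOD
def pvBody2 (s : Int) : Int := PySem.Int.mod (PySem.Int.bxor s (PySem.Int.floordiv s 32)) pvMOD
def pvBody3 (s : Int) : Int := PySem.Int.mod (PySem.Int.bxor s (s * 2048)) pvMOD
def pvBody (s : Int) : Int := pvBody3 (pvBody2 (pvBody1 s))

-- xor then % MOD, with a power-of-two multiplied copy: sub-steps 1 and 3, any sign
theorem pvMulStep (k : ℕ) (c : Int) (hc : c = 2 ^ k) (hk : k < 24) (s : Int) :
    PySem.Int.mod (PySem.Int.bxor s (s * c)) pvMOD =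
      (((s % 16777216).toNat ^^^ (s % 16777216).toNat <<< k) % 2 ^ 24 : ℕ) := by
  subst hc
  rw [show pvMOD = 16777216 from rfl, PySem.Int.mod_eq_emod_of_pos (by norm_num), pvBxorEmod]
  congr 1
  obtain ⟨x, hxeq⟩ : ∃ x : ℕ, s % 16777216 = (x : Int) := ⟨(s % 16777216).toNat, by
    have := pvRedLt s
    omega⟩
  have hxlt : x < 2 ^ 24 := by
    have := Int.emod_lt_of_pos s (by norm_num : (0:Int) < 16777216)
    omega
  have hpk : (2:Int) ^ k % 16777216 = 2 ^ k := by
    have h1 : (2:Int) ^ k < 2 ^ 24 := by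
      apply pow_lt_pow_right₀ (by norm_num) hk
    have h2 : (0:Int) ≤ 2 ^ k := by positivity
    omega
  have h1 : (s * 2 ^ k) % 16777216 = ((x * 2 ^ k : ℕ) : Int) % 16777216 := by
    rw [Int.mul_emod, hxeq, hpk]
    push_cast
    ring_nf
  rw [hxeq, h1, pvNatEmod, Int.toNat_natCast, Int.toNat_natCast, pvXorMod,
    Nat.mod_eq_of_lt hxlt, Nat.shiftLeft_eq]

theorem pvModCastNat (v : ℕ) (hv : v < 2 ^ 24) : ((v : Int)) % 16777216 = (v : Int) := by
  omega

theorem pvStep1_eq (s : Int) : pvBody1 s = ((pvS1 (s % 16777216).toNat : ℕ) : Int) :=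
  pvMulStep 6 64 (by norm_num) (by norm_num) s

theorem pvStep3_eq (v : ℕ) (hv : v < 2 ^ 24) : pvBody3 (v : Int) = ((pvS3 v : ℕ) : Int) := by
  rw [pvBody3.eq_def, pvMulStep 11 2048 (by norm_num) (by norm_num) (v : Int),
    pvModCastNat v hv, Int.toNat_natCast]
  rfl

theorem pvStep2_eq (v : ℕ) (_hv : v < 2 ^ 24) : pvBody2 (v : Int) = ((pvS2 v : ℕ) : Int) := by
  have hdiv : PySem.Int.floordiv (v : Int) 32 = ((v / 32 : ℕ) : Int) := by
    rw [PySem.Int.floordiv_eq_ediv_of_pos (by norm_num)]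
    push_cast
    rfl
  rw [pvBody2.eq_def, hdiv, PySem.Int.bxor_natCast, show pvMOD = 16777216 from rfl,
    PySem.Int.mod_eq_emod_of_pos (by norm_num), pvNatEmod]
  unfold pvS2
  rw [Nat.shiftRight_eq_div_pow]

theorem pvBody_eq (s : Int) : pvBody s = ((pvN (s % 16777216).toNat : ℕ) : Int) := by
  have h1 : pvS1 (s % 16777216).toNat < 2 ^ 24 := Nat.mod_lt _ (by norm_num)
  have h2 : pvS2 (pvS1 (s % 16777216).toNat) < 2 ^ 24 := Nat.mod_lt _ (by norm_num)
  rw [pvBody.eq_def, pvStep1_eq s, pvStep2_eq _ h1, pvStep3_eq _ h2]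
  rfl

theorem pvN_lt (x : ℕ) : pvN x < 2 ^ 24 := Nat.mod_lt _ (by norm_num)

-- linearity (over GF(2)) of each sub-step, hence of pvN
theorem pvShlXor (x y k : ℕ) : (x ^^^ y) <<< k = x <<< k ^^^ y <<< k := by
  apply Nat.eq_of_testBit_eq
  intro i
  rw [Nat.testBit_xor, Nat.testBit_shiftLeft, Nat.testBit_shiftLeft, Nat.testBit_shiftLeft,
    Nat.testBit_xor]
  by_cases h : i ≥ k <;> simp [h]

theorem pvShrXor (x y k : ℕ) : (x ^^^ y) >>> k = x >>> k ^^^ y >>> k := by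
  apply Nat.eq_of_testBit_eq
  intro i
  rw [Nat.testBit_xor, Nat.testBit_shiftRight, Nat.testBit_shiftRight, Nat.testBit_shiftRight,
    Nat.testBit_xor]

theorem pvSubLin (f : ℕ → ℕ) (hf : ∀ x y, f (x ^^^ y) = f x ^^^ f y) (x y : ℕ) :
    ((x ^^^ y) ^^^ f (x ^^^ y)) % 2 ^ 24 = ((x ^^^ f x) % 2 ^ 24) ^^^ ((y ^^^ f y) % 2 ^ 24) := by
  rw [hf, ← pvXorMod]
  congr 1
  simp [Nat.xor_comm, Nat.xor_left_comm]

theorem pvS1_lin (x y : ℕ) : pvS1 (x ^^^ y) = pvS1 x ^^^ pvS1 y :=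
  pvSubLin (· <<< 6) (fun a b => pvShlXor a b 6) x y

theorem pvS2_lin (x y : ℕ) : pvS2 (x ^^^ y) = pvS2 x ^^^ pvS2 y :=
  pvSubLin (· >>> 5) (fun a b => pvShrXor a b 5) x y

theorem pvS3_lin (x y : ℕ) : pvS3 (x ^^^ y) = pvS3 x ^^^ pvS3 y :=
  pvSubLin (· <<< 11) (fun a b => pvShlXor a b 11) x y

theorem pvN_linear (x y : ℕ) : pvN (x ^^^ y) = pvN x ^^^ pvN y := by
  unfold pvN
  rw [pvS1_lin, pvS2_lin, pvS3_lin]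

-- ===== A computes iterates of pvN =====

theorem pvFoldlBody (l : List Int) (s : Int) :
    l.foldl (fun t _ => pvBody t) s = pvBody^[l.length] s := by
  induction l generalizing s with
  | nil => rfl
  | cons a l ih => simp [List.foldl_cons, ih, Function.iterate_succ_apply]

theorem pvIterBody (k : ℕ) (s : Int) :
    pvBody^[k + 1] s = ((pvN^[k + 1] (s % 16777216).toNat : ℕ) : Int) := by
  induction k with
  | zero => simpa using pvBody_eq s
  | succ k ih =>
    have hlt : pvN^[k + 1] ((s % 16777216).toNat) < 2 ^ 24 := by
      rw [Function.iterate_succ_apply']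
      exact pvN_lt _
    rw [Function.iterate_succ_apply', ih, pvBody_eq, pvModCastNat _ hlt, Int.toNat_natCast,
      show pvN^[k + 1 + 1] ((s % 16777216).toNat) = pvN (pvN^[k + 1] ((s % 16777216).toNat)) from
        Function.iterate_succ_apply' pvN (k + 1) _]

theorem pvA_eq (secret : Int) (n : Int) (hn : 0 < n) :
    compute_nth secret n = ((pvN^[n.toNat] (secret % 16777216).toNat : ℕ) : Int) := by
  have h : compute_nth secret n =
      (PySem.List.pyRange 0 n 1).foldl (fun t _ => pvBody t) secret := rfl
  rw [h, pvFoldlBody, PySem.List.length_pyRange_one]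
  have h0 : (n - 0).toNat = n.toNat := by omega
  obtain ⟨k, hk⟩ : ∃ k : ℕ, n.toNat = k + 1 := ⟨n.toNat - 1, by omega⟩
  rw [h0, hk, pvIterBody]

-- ===== B: column representation =====

-- column representation invariant: a 24-entry list whose j-th entry is g(2^j)
def pvCols (cols : List Int) (g : ℕ → ℕ) : Prop :=
  cols.length = 24 ∧ ∀ j < 24, cols.getD j 0 = ((g (2 ^ j) : ℕ) : Int) ∧ g (2 ^ j) < 2 ^ 24

def pvLin (g : ℕ → ℕ) : Prop := (∀ x y, g (x ^^^ y) = g x ^^^ g y) ∧ ∀ x, g x < 2 ^ 24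

theorem pvTwoMulXorOne (q : ℕ) : 2 * q ^^^ 1 = 2 * q + 1 := by
  apply Nat.eq_of_testBit_eq
  intro i
  cases i <;> simp [Nat.testBit_succ]

theorem pvBitSplit (v j : ℕ) : v * 2 ^ j = (v % 2 * 2 ^ j) ^^^ (v / 2 * 2 ^ (j + 1)) := by
  rcases Nat.mod_two_eq_zero_or_one v with h2 | h2
  · rw [h2]
    simp only [Nat.zero_mul, Nat.zero_xor]
    have hv : v = 2 * (v / 2) := by omega
    rw [pow_succ]
    conv_lhs => rw [hv]
    ring
  · rw [h2, one_mul]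
    have h1 : (2:ℕ) ^ j = 1 <<< j := by simp [Nat.shiftLeft_eq]
    have h2' : v / 2 * 2 ^ (j + 1) = (2 * (v / 2)) <<< j := by
      rw [Nat.shiftLeft_eq]
      ring
    have h3 : v * 2 ^ j = (2 * (v / 2) + 1) <<< j := by
      rw [Nat.shiftLeft_eq]
      have hv : v = 2 * (v / 2) + 1 := by omega
      conv_lhs => rw [hv]
    rw [h3, h2', h1, ← pvShlXor]
    congr 1
    rw [Nat.xor_comm]
    exact (pvTwoMulXorOne _).symm

theorem pvApply_eq {g : ℕ → ℕ} {cols : List Int} (hg : pvLin g) (hc : pvCols cols g)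
    (v j out : ℕ) (hv : v < 2 ^ (24 - j)) (hj : j ≤ 24) :
    pvApply cols (v : Int) j (out : Int) = ((out ^^^ g (v * 2 ^ j) : ℕ) : Int) := by
  induction v using Nat.strong_induction_on generalizing j out with
  | _ v ih =>
  rcases Nat.eq_zero_or_pos v with rfl | hpos
  · rw [pvApply]
    have hg0 : g 0 = 0 := by
      have := hg.1 0 0
      simp at this
      omega
    simp [hg0]
  · have hj24 : j < 24 := by
      by_contra hcon
      have : j = 24 := by omega
      subst this
      simp at hv
      omega
    rw [pvApply, if_pos (by exact_mod_cast hpos)]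
    have hmod : PySem.Int.mod (v : Int) 2 = ((v % 2 : ℕ) : Int) := by
      rw [PySem.Int.mod_eq_emod_of_pos (by norm_num)]
      push_cast
      rfl
    have hdiv : PySem.Int.floordiv (v : Int) 2 = ((v / 2 : ℕ) : Int) := by
      rw [PySem.Int.floordiv_eq_ediv_of_pos (by norm_num)]
      push_cast
      rfl
    have hget : PySem.List.pyGetD cols ((j : Nat) : Int) 0 = ((g (2 ^ j) : ℕ) : Int) := by
      rw [PySem.List.pyGetD_natCast]
      exact (hc.2 j hj24).1
    have hv2 : v / 2 < 2 ^ (24 - (j + 1)) := by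
      have h24 : 24 - j = (24 - (j + 1)) + 1 := by omega
      rw [h24, pow_succ] at hv
      omega
    have hrec := ih (v / 2) (by omega) (j + 1) (if v % 2 = 1 then out ^^^ g (2 ^ j) else out)
      hv2 (by omega)
    rw [hmod, hdiv]
    rcases Nat.mod_two_eq_zero_or_one v with h2 | h2
    · rw [h2]
      rw [if_neg (show ¬(((0:ℕ) : Int) = 1) from by norm_num)]
      rw [h2] at hrec
      rw [if_neg (by norm_num)] at hrec
      rw [hrec]
      congr 2
      rw [pvBitSplit v j, h2, hg.1]
      have hg0 : g 0 = 0 := by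
        have := hg.1 0 0
        simp at this
        omega
      simp [hg0]
    · rw [h2]
      rw [if_pos (show (((1:ℕ) : Int) = 1) from by norm_num), hget, PySem.Int.bxor_natCast]
      rw [h2] at hrec
      rw [if_pos rfl] at hrec
      rw [hrec]
      congr 1
      rw [pvBitSplit v j, h2, hg.1, one_mul]
      simp [Nat.xor_assoc]

theorem pvColsMap {g h : ℕ → ℕ} {cols res : List Int} (hg : pvLin g) (hc : pvCols cols g)
    (hr : pvCols res h) :
    pvCols (res.map (fun v => pvApply cols v 0 0)) (fun x => g (h x)) := by
  refine ⟨by simp [hr.1], fun j hj => ?_⟩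
  have hjlen : j < res.length := by
    have := hr.1
    omega
  have hmap : (res.map (fun v => pvApply cols v 0 0)).getD j 0 =
      pvApply cols (res.getD j 0) 0 0 := by
    rw [List.getD_eq_getElem _ _ (by simpa using hjlen), List.getElem_map,
      List.getD_eq_getElem _ _ hjlen]
  rw [hmap, (hr.2 j hj).1]
  have := pvApply_eq hg hc (h (2 ^ j)) 0 0 (by simpa using (hr.2 j hj).2) (by omega)
  rw [show ((0:ℕ) : Int) = (0 : Int) from rfl] at this
  rw [this]
  constructor
  · congr 1
    simp
  · exact hg.2 _

theorem pvSqIter (g : ℕ → ℕ) (k : ℕ) (y : ℕ) : (fun x => g (g x))^[k] y = g^[2 * k] y := by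
  induction k generalizing y with
  | zero => rfl
  | succ k ih =>
    rw [Function.iterate_succ_apply, ih, show 2 * (k + 1) = 2 * k + 2 by ring,
      Function.iterate_add_apply]
    rfl

theorem pvCols_congr {f1 f2 : ℕ → ℕ} {cols : List Int} (hf : ∀ x, f1 x = f2 x)
    (h : pvCols cols f1) : pvCols cols f2 := by
  refine ⟨h.1, fun j hj => ?_⟩
  rw [← hf]
  exact h.2 j hj

theorem pvPowLoop_eq (e : ℕ) (g h : ℕ → ℕ) (cols res : List Int)
    (hg : pvLin g) (hc : pvCols cols g) (hr : pvCols res h) :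
    pvCols (pvPowLoop cols res (e : Int)) (fun x => g^[e] (h x)) := by
  induction e using Nat.strong_induction_on generalizing g h cols res with
  | _ e ih =>
  rcases Nat.eq_zero_or_pos e with rfl | hpos
  · rw [pvPowLoop]
    simpa using hr
  · rw [pvPowLoop, if_pos (by exact_mod_cast hpos)]
    have hmod : PySem.Int.mod (e : Int) 2 = ((e % 2 : ℕ) : Int) := by
      rw [PySem.Int.mod_eq_emod_of_pos (by norm_num)]
      push_cast
      rfl
    have hdiv : PySem.Int.floordiv (e : Int) 2 = ((e / 2 : ℕ) : Int) := by
      rw [PySem.Int.floordiv_eq_ediv_of_pos (by norm_num)]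
      push_cast
      rfl
    have hgg : pvLin (fun x => g (g x)) :=
      ⟨fun x y => by simp only [hg.1], fun x => hg.2 _⟩
    have hcc : pvCols (cols.map (fun v => pvApply cols v 0 0)) (fun x => g (g x)) :=
      pvColsMap hg hc hc
    rw [hmod, hdiv]
    rcases Nat.mod_two_eq_zero_or_one e with h2 | h2
    · rw [h2, if_neg (show ¬(((0:ℕ) : Int) = 1) from by norm_num)]
      have := ih (e / 2) (by omega) (fun x => g (g x)) h _ _ hgg hcc hr
      refine pvCols_congr (fun x => ?_) this
      rw [pvSqIter]
      congr 1
      omega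
    · rw [h2, if_pos (show (((1:ℕ) : Int) = 1) from by norm_num)]
      have hgh : pvCols (res.map (fun v => pvApply cols v 0 0)) (fun x => g (h x)) :=
        pvColsMap hg hc hr
      have := ih (e / 2) (by omega) (fun x => g (g x)) (fun x => g (h x)) _ _ hgg hcc hgh
      refine pvCols_congr (fun x => ?_) this
      rw [pvSqIter, ← Function.iterate_succ_apply]
      congr 1
      omega

theorem pvLinIter (k : ℕ) : pvLin (pvN^[k + 1]) := by
  induction k with
  | zero => exact ⟨fun x y => by simpa using pvN_linear x y, fun x => by simpa using pvN_lt x⟩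
  | succ k ih =>
    constructor
    · intro x y
      have h1 := Function.iterate_succ_apply' pvN (k + 1) (x ^^^ y)
      have h2 := Function.iterate_succ_apply' pvN (k + 1) x
      have h3 := Function.iterate_succ_apply' pvN (k + 1) y
      rw [h1, h2, h3, ih.1, pvN_linear]
    · intro x
      rw [Function.iterate_succ_apply']
      exact pvN_lt _

theorem pvB_eq (secret : Int) (n : Int) (hn : 0 < n) :
    compute_nth_alt secret n = ((pvN^[n.toNat] (secret % 16777216).toNat : ℕ) : Int) := by
  rw [compute_nth_alt, if_neg (by omega)]
  have hcols : pvCols ((PySem.List.pyRange 0 24 1).map (fun j => pvStep (2 ^ j.toNat))) pvN := by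
    constructor
    · decide
    · decide
  have hres : pvCols ((PySem.List.pyRange 0 24 1).map (fun j => (2 : Int) ^ j.toNat)) id := by
    constructor
    · decide
    · decide
  obtain ⟨k, hk⟩ : ∃ k : ℕ, n = ((k + 1 : ℕ) : Int) := ⟨n.toNat - 1, by omega⟩
  rw [hk]
  have hpow := pvPowLoop_eq (k + 1) pvN id _ _
    ⟨pvN_linear, pvN_lt⟩ hcols hres
  have hfin : pvCols (pvPowLoop _ _ ((k + 1 : ℕ) : Int)) (pvN^[k + 1]) :=
    pvCols_congr (fun x => rfl) hpow
  have hsec : PySem.Int.mod secret pvMOD = (((secret % 16777216).toNat : ℕ) : Int) := by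
    rw [show pvMOD = 16777216 from rfl, PySem.Int.mod_eq_emod_of_pos (by norm_num)]
    omega
  rw [hsec]
  have := pvApply_eq (pvLinIter k) hfin ((secret % 16777216).toNat) 0 0
    (by simpa using pvRedLt secret) (by omega)
  rw [show ((0:ℕ) : Int) = (0 : Int) from rfl] at this
  rw [this]
  simp

-- ===== VERDICT (by name: the statement is the Claim_ definition above) =====
theorem compute_nth_spec : Claim_equal_compute_nth := by
  intro secret n _
  unfold Spec_compute_nth
  rcases le_or_gt n 0 with h | h
  · rw [compute_nth_alt, if_pos h, compute_nth,
      PySem.List.pyRange_one_eq_nil (by exact h)]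
    rfl
  · rw [pvA_eq secret n h, pvB_eq secret n h]
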